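-- pv_equiv track=rewrite | github.com/kelvintawe12/hex-software-python_programing | TASK 2/voice.py | interpret_command
-- ===== SOURCE A (Python) =====
-- def interpret_command(command):
--     corrections = {
--         "hex soft": "hex software",
--         "open browse": "open browser",
--         "play songs": "play music"
--     }
--     for wrong, correct in corrections.items():
--         if wrong in command:
--             command = command.replace(wrong, correct)
--     return command
-- ===== SOURCE B (Python) =====
-- import re
--
-- _CORRECTIONS = {
--     "hex soft": "hex software",
--     "open browse": "open browser",
--     "play songs": "play music",
-- }
-- _PATTERN = re.compile("|".join(map(re.escape, _CORRECTIONS)))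
--
--
-- def interpret_command(command):
--     return _PATTERN.sub(lambda m: _CORRECTIONS[m.group(0)], command)
-- ===== Notes on version B (the rewrite author's own statement) =====
-- stated objective: idiomatic
-- what changed: A's loop of three sequential full-string str.replace passes is replaced by one precompiled alternation regex whose single left-to-right re.sub pass looks each match up in the corrections table; equivalence holds because the keys never overlap each other and no replacement value creates a later key.
import Mathlib
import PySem

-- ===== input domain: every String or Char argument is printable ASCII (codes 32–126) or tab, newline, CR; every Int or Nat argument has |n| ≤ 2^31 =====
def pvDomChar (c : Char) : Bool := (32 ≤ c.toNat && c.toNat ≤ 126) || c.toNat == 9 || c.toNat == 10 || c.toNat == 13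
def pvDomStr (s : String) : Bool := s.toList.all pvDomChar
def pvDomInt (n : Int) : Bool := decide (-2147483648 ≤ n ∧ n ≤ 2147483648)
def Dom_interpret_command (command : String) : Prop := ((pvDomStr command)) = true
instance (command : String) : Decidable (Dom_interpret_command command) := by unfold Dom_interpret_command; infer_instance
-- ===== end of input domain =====

-- B replaces A's three sequential full-string replace passes by ONE left-to-right scan
-- (a compiled alternation regex with a table-lookup callback); equivalence of the RETURN value is proved.

-- ===== PORT A =====
-- A's dict literal has three fixed items; the `for wrong, correct in corrections.items()`
-- loop is transliterated as its three iterations in dict insertion order.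
def interpret_command (command : String) : String :=
  let c1 := if PySem.Str.isIn "hex soft" command then PySem.Str.replace command "hex soft" "hex software" else command
  let c2 := if PySem.Str.isIn "open browse" c1 then PySem.Str.replace c1 "open browse" "open browser" else c1
  let c3 := if PySem.Str.isIn "play songs" c2 then PySem.Str.replace c2 "play songs" "play music" else c2
  c3

-- ===== PORT B =====
-- The keys and replacement values of Source B's _CORRECTIONS table, as char lists.
def pvK1 : List Char := ['h','e','x',' ','s','o','f','t']
def pvR1 : List Char := ['h','e','x',' ','s','o','f','t','w','a','r','e']
def pvK2 : List Char := ['o','p','e','n',' ','b','r','o','w','s','e']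
def pvR2 : List Char := ['o','p','e','n',' ','b','r','o','w','s','e','r']
def pvK3 : List Char := ['p','l','a','y',' ','s','o','n','g','s']
def pvR3 : List Char := ['p','l','a','y',' ','m','u','s','i','c']

-- Hand port of Source B's single `_PATTERN.sub` pass (PySem has no regex): the engine scans
-- left to right; at each position it tries the alternation's branches in order (the dict
-- keys, in insertion order); on a match it emits the callback's table value and resumes
-- after the match, otherwise it keeps the character.  Exact for this alternation of
-- fixed strings (no regex metacharacters survive re.escape).
def pvScan : List Char → List Char
  | [] => []
  | c :: t =>
    if pvK1.isPrefixOf (c :: t) then pvR1 ++ pvScan (t.drop 7)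
    else if pvK2.isPrefixOf (c :: t) then pvR2 ++ pvScan (t.drop 10)
    else if pvK3.isPrefixOf (c :: t) then pvR3 ++ pvScan (t.drop 9)
    else c :: pvScan t
termination_by l => l.length
decreasing_by all_goals simp

def interpret_command_alt (command : String) : String :=
  String.ofList (pvScan command.toList)

-- ===== PRECONDITION & SPEC =====
def Spec_interpret_command (command : String) (out : String) : Prop := out = interpret_command_alt command
instance (command : String) (out : String) : Decidable (Spec_interpret_command command out) := by unfold Spec_interpret_command; infer_instance

-- ===== CLAIM (what is proved, stated in full; the proofs are below) =====
def Claim_equal_interpret_command : Prop := ∀ (command : String), Dom_interpret_command command → Spec_interpret_command command (interpret_command command)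

-- ===== LEMMAS AND PROOFS =====

-- Python str.replace as a direct leftmost-first recursion on the list of characters
-- (proved below to agree with PySem.Chars.replace for a nonempty pattern).
def pvRep (old new : List Char) : List Char → List Char
  | [] => []
  | c :: t =>
    if old.isPrefixOf (c :: t) then new ++ pvRep old new (t.drop (old.length - 1))
    else c :: pvRep old new t
termination_by l => l.length
decreasing_by all_goals simp

theorem pvRep_nil (old new : List Char) : pvRep old new [] = [] := by simp [pvRep]

theorem pvRep_pos (old new u : List Char) (h : old ≠ []) :
    pvRep old new (old ++ u) = new ++ pvRep old new u := by
  cases old with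
  | nil => exact absurd rfl h
  | cons c k =>
    rw [List.cons_append, pvRep]
    rw [if_pos (List.isPrefixOf_iff_prefix.mpr
      (by rw [← List.cons_append]; exact List.prefix_append _ _))]
    simp

theorem pvRep_neg (old new : List Char) (c : Char) (t : List Char) (h : ¬ old <+: (c :: t)) :
    pvRep old new (c :: t) = c :: pvRep old new t := by
  rw [pvRep, if_neg (by simpa [List.isPrefixOf_iff_prefix] using h)]

theorem pvGo_eq (old new : List Char) (h : old ≠ []) :
    ∀ (fuel : Nat) (l acc : List Char), l.length ≤ fuel →
      PySem.Chars.replace.go old new fuel l acc = acc.reverse ++ pvRep old new l := by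
  intro fuel
  induction fuel with
  | zero =>
    intro l acc hl
    have : l = [] := List.length_eq_zero_iff.mp (Nat.le_zero.mp hl)
    subst this
    simp [PySem.Chars.replace.go, pvRep_nil]
  | succ n ih =>
    intro l acc hl
    cases l with
    | nil => simp [PySem.Chars.replace.go, pvRep_nil]
    | cons c t =>
      rw [PySem.Chars.replace.go]
      by_cases hp : old.isPrefixOf (c :: t)
      · rw [if_pos hp]
        obtain ⟨u, hu⟩ := List.isPrefixOf_iff_prefix.mp hp
        have hlen : 1 ≤ old.length := by
          cases old with
          | nil => exact absurd rfl h
          | cons _ _ => simp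
        have hdrop : List.drop old.length (c :: t) = u := by
          rw [← hu, List.drop_left]
        have hlen2 : (List.drop old.length (c :: t)).length ≤ n := by
          rw [hdrop]
          have h2 := congrArg List.length hu
          simp at h2 hl ⊢
          omega
        rw [ih _ _ hlen2, hdrop, ← hu, pvRep_pos old new u h]
        simp
      · rw [if_neg hp]
        have ht : t.length ≤ n := by simp at hl; omega
        rw [ih t _ ht, pvRep_neg old new c t (fun hpre => hp (List.isPrefixOf_iff_prefix.mpr hpre))]
        simp

theorem pvReplace_eq (s old new : List Char) (h : old ≠ []) :
    PySem.Chars.replace s old new = pvRep old new s := by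
  rw [PySem.Chars.replace, if_neg (by simpa [List.isEmpty_iff] using h)]
  simpa using pvGo_eq old new h s.length s [] le_rfl

theorem pvRep_no_occ (old new : List Char) : ∀ s : List Char, ¬ old <:+: s → pvRep old new s = s := by
  intro s
  induction s with
  | nil => intro _; exact pvRep_nil old new
  | cons c t ih =>
    intro hno
    rw [pvRep_neg old new c t (fun hp => hno hp.isInfix)]
    rw [ih (fun hi => hno (hi.trans (List.suffix_cons c t).isInfix))]

theorem pvPrefix_append_iff (x a b : List Char) (h : x.length ≤ a.length) :
    x <+: (a ++ b) ↔ x <+: a := by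
  rw [List.prefix_iff_eq_take, List.prefix_iff_eq_take, List.take_append_of_le_length h]

-- skipping a literal block none of whose positions starts a match
theorem pvRep_skip (old new : List Char) :
    ∀ u v : List Char, (∀ i, i < u.length → ¬ old <+: (u.drop i ++ v)) →
      pvRep old new (u ++ v) = u ++ pvRep old new v := by
  intro u
  induction u with
  | nil => intro v _; simp
  | cons c t ih =>
    intro v h
    rw [List.cons_append, pvRep_neg old new c (t ++ v) (by simpa using h 0 (by simp))]
    rw [ih v (fun i hi => by simpa using h (i+1) (by simpa using hi))]
    rfl

theorem pvS12 (v : List Char) : pvRep pvK1 pvR1 (pvK2 ++ v) = pvK2 ++ pvRep pvK1 pvR1 v := by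
  apply pvRep_skip
  intro i hi
  simp [pvK2] at hi
  interval_cases i <;> simp [pvK1, pvK2, List.cons_prefix_cons]

theorem pvS13 (v : List Char) : pvRep pvK1 pvR1 (pvK3 ++ v) = pvK3 ++ pvRep pvK1 pvR1 v := by
  apply pvRep_skip
  intro i hi
  simp [pvK3] at hi
  interval_cases i <;> simp [pvK1, pvK3, List.cons_prefix_cons]

theorem pvS2r1 (v : List Char) : pvRep pvK2 pvR2 (pvR1 ++ v) = pvR1 ++ pvRep pvK2 pvR2 v := by
  apply pvRep_skip
  intro i hi
  simp [pvR1] at hi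
  interval_cases i <;> simp [pvK2, pvR1, List.cons_prefix_cons]

theorem pvS23 (v : List Char) : pvRep pvK2 pvR2 (pvK3 ++ v) = pvK3 ++ pvRep pvK2 pvR2 v := by
  apply pvRep_skip
  intro i hi
  simp [pvK3] at hi
  interval_cases i <;> simp [pvK2, pvK3, List.cons_prefix_cons]

theorem pvS3r1 (v : List Char) : pvRep pvK3 pvR3 (pvR1 ++ v) = pvR1 ++ pvRep pvK3 pvR3 v := by
  apply pvRep_skip
  intro i hi
  simp [pvR1] at hi
  interval_cases i <;> simp [pvK3, pvR1, List.cons_prefix_cons]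

theorem pvS3r2 (v : List Char) : pvRep pvK3 pvR3 (pvR2 ++ v) = pvR2 ++ pvRep pvK3 pvR3 v := by
  apply pvRep_skip
  intro i hi
  simp [pvR2] at hi
  interval_cases i <;> simp [pvK3, pvR2, List.cons_prefix_cons]

-- prefixes without 'h' pass through the "hex soft" replacement unchanged
theorem pvNH1 : ∀ (s x : List Char), (∀ ch ∈ x, ch ≠ 'h') →
    (x <+: pvRep pvK1 pvR1 s ↔ x <+: s) := by
  have main : ∀ (n : Nat) (s x : List Char), s.length ≤ n → (∀ ch ∈ x, ch ≠ 'h') →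
      (x <+: pvRep pvK1 pvR1 s ↔ x <+: s) := by
    intro n
    induction n with
    | zero =>
      intro s x hs _
      have : s = [] := List.length_eq_zero_iff.mp (Nat.le_zero.mp hs)
      subst this
      simp [pvRep_nil]
    | succ n ih =>
      intro s x hs hx
      cases s with
      | nil => simp [pvRep_nil]
      | cons c t =>
        by_cases hp : pvK1 <+: (c :: t)
        · obtain ⟨u, hu⟩ := hp
          rw [← hu, pvRep_pos _ _ _ (by simp [pvK1])]
          cases x with
          | nil => simp
          | cons y x' =>
            have hy : y ≠ 'h' := hx y (by simp)
            constructor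
            · intro hpre
              exfalso
              rw [show pvR1 ++ pvRep pvK1 pvR1 u =
                'h' :: (['e','x',' ','s','o','f','t','w','a','r','e'] ++ pvRep pvK1 pvR1 u) from by simp [pvR1]] at hpre
              exact hy (List.cons_prefix_cons.mp hpre).1
            · intro hpre
              exfalso
              rw [show pvK1 ++ u = 'h' :: (['e','x',' ','s','o','f','t'] ++ u) from by simp [pvK1]] at hpre
              exact hy (List.cons_prefix_cons.mp hpre).1
        · rw [pvRep_neg _ _ _ _ hp]
          cases x with
          | nil => simp
          | cons y x' =>
            rw [List.cons_prefix_cons, List.cons_prefix_cons]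
            have ht : t.length ≤ n := by simp at hs; omega
            exact and_congr_right fun _ => ih t x' ht (fun ch hc => hx ch (by simp [hc]))
  intro s x hx
  exact main s.length s x le_rfl hx

-- prefixes of length ≤ 11 pass through the "open browse" replacement unchanged
theorem pvNH2 : ∀ (s x : List Char), x.length ≤ 11 →
    (x <+: pvRep pvK2 pvR2 s ↔ x <+: s) := by
  have main : ∀ (n : Nat) (s x : List Char), s.length ≤ n → x.length ≤ 11 →
      (x <+: pvRep pvK2 pvR2 s ↔ x <+: s) := by
    intro n
    induction n with
    | zero =>
      intro s x hs _
      have : s = [] := List.length_eq_zero_iff.mp (Nat.le_zero.mp hs)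
      subst this
      simp [pvRep_nil]
    | succ n ih =>
      intro s x hs hx
      cases s with
      | nil => simp [pvRep_nil]
      | cons c t =>
        by_cases hp : pvK2 <+: (c :: t)
        · obtain ⟨u, hu⟩ := hp
          rw [← hu, pvRep_pos _ _ _ (by simp [pvK2])]
          have h1 : pvR2 ++ pvRep pvK2 pvR2 u = pvK2 ++ (['r'] ++ pvRep pvK2 pvR2 u) := by
            simp [pvR2, pvK2]
          rw [h1, pvPrefix_append_iff x pvK2 _ (by simpa [pvK2] using hx),
            pvPrefix_append_iff x pvK2 _ (by simpa [pvK2] using hx)]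
        · rw [pvRep_neg _ _ _ _ hp]
          cases x with
          | nil => simp
          | cons y x' =>
            rw [List.cons_prefix_cons, List.cons_prefix_cons]
            have ht : t.length ≤ n := by simp at hs; omega
            have hx' : x'.length ≤ 11 := by simp at hx; omega
            exact and_congr_right fun _ => ih t x' ht hx'
  intro s x hx
  exact main s.length s x le_rfl hx

theorem pvScan_nil : pvScan [] = [] := by simp [pvScan]

theorem pvScan_k1 (u : List Char) : pvScan (pvK1 ++ u) = pvR1 ++ pvScan u := by
  rw [show pvK1 ++ u = 'h' :: (['e','x',' ','s','o','f','t'] ++ u) from by simp [pvK1]]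
  rw [pvScan, if_pos (by simp [pvK1, List.isPrefixOf])]
  simp

theorem pvScan_k2 (u : List Char) : pvScan (pvK2 ++ u) = pvR2 ++ pvScan u := by
  rw [show pvK2 ++ u = 'o' :: (['p','e','n',' ','b','r','o','w','s','e'] ++ u) from by simp [pvK2]]
  rw [pvScan, if_neg (by simp [pvK1, List.isPrefixOf]), if_pos (by simp [pvK2, List.isPrefixOf])]
  simp

theorem pvScan_k3 (u : List Char) : pvScan (pvK3 ++ u) = pvR3 ++ pvScan u := by
  rw [show pvK3 ++ u = 'p' :: (['l','a','y',' ','s','o','n','g','s'] ++ u) from by simp [pvK3]]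
  rw [pvScan, if_neg (by simp [pvK1, List.isPrefixOf]), if_neg (by simp [pvK2, List.isPrefixOf]),
    if_pos (by simp [pvK3, List.isPrefixOf])]
  simp

theorem pvScan_neg (c : Char) (t : List Char) (h1 : ¬ pvK1 <+: (c :: t))
    (h2 : ¬ pvK2 <+: (c :: t)) (h3 : ¬ pvK3 <+: (c :: t)) :
    pvScan (c :: t) = c :: pvScan t := by
  rw [pvScan,
    if_neg (by simpa [List.isPrefixOf_iff_prefix] using h1),
    if_neg (by simpa [List.isPrefixOf_iff_prefix] using h2),
    if_neg (by simpa [List.isPrefixOf_iff_prefix] using h3)]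

-- the heart of the equivalence: A's three sequential passes equal B's single scan
set_option maxRecDepth 8192 in
theorem pvMain : ∀ l : List Char,
    pvRep pvK3 pvR3 (pvRep pvK2 pvR2 (pvRep pvK1 pvR1 l)) = pvScan l := by
  have main : ∀ (n : Nat) (l : List Char), l.length ≤ n →
      pvRep pvK3 pvR3 (pvRep pvK2 pvR2 (pvRep pvK1 pvR1 l)) = pvScan l := by
    intro n
    induction n with
    | zero =>
      intro l hl
      have : l = [] := List.length_eq_zero_iff.mp (Nat.le_zero.mp hl)
      subst this
      simp [pvRep_nil, pvScan_nil]
    | succ n ih =>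
      intro l hl
      cases l with
      | nil => simp [pvRep_nil, pvScan_nil]
      | cons c t =>
        by_cases h1 : pvK1 <+: (c :: t)
        · obtain ⟨u, hu⟩ := h1
          rw [← hu, pvRep_pos _ _ _ (by simp [pvK1]), pvS2r1, pvS3r1, pvScan_k1]
          have hul : u.length ≤ n := by
            have h2 := congrArg List.length hu
            simp [pvK1] at h2
            simp at hl
            omega
          rw [ih u hul]
        · by_cases h2 : pvK2 <+: (c :: t)
          · obtain ⟨u, hu⟩ := h2
            rw [← hu, pvS12, pvRep_pos _ _ _ (by simp [pvK2]), pvS3r2, pvScan_k2]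
            have hul : u.length ≤ n := by
              have h3 := congrArg List.length hu
              simp [pvK2] at h3
              simp at hl
              omega
            rw [ih u hul]
          · by_cases h3 : pvK3 <+: (c :: t)
            · obtain ⟨u, hu⟩ := h3
              rw [← hu, pvS13, pvS23, pvRep_pos _ _ _ (by simp [pvK3]), pvScan_k3]
              have hul : u.length ≤ n := by
                have h4 := congrArg List.length hu
                simp [pvK3] at h4
                simp at hl
                omega
              rw [ih u hul]
            · rw [pvRep_neg _ _ _ _ h1]
              have h2' : ¬ pvK2 <+: (c :: pvRep pvK1 pvR1 t) := by
                intro hpre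
                apply h2
                simp only [pvK2, List.cons_prefix_cons] at hpre ⊢
                refine ⟨hpre.1, ?_⟩
                have hx : ∀ ch ∈ (['p','e','n',' ','b','r','o','w','s','e'] : List Char), ch ≠ 'h' := by simp
                exact (pvNH1 t _ hx).mp hpre.2
              rw [pvRep_neg _ _ _ _ h2']
              have h3' : ¬ pvK3 <+: (c :: pvRep pvK2 pvR2 (pvRep pvK1 pvR1 t)) := by
                intro hpre
                apply h3
                simp only [pvK3, List.cons_prefix_cons] at hpre ⊢
                refine ⟨hpre.1, ?_⟩
                have hl9 : (['l','a','y',' ','s','o','n','g','s'] : List Char).length ≤ 11 := by decide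
                have hx : ∀ ch ∈ (['l','a','y',' ','s','o','n','g','s'] : List Char), ch ≠ 'h' := by simp
                exact (pvNH1 t _ hx).mp ((pvNH2 (pvRep pvK1 pvR1 t) _ hl9).mp hpre.2)
              rw [pvRep_neg _ _ _ _ h3']
              rw [pvScan_neg c t h1 h2 h3]
              have ht : t.length ≤ n := by simp at hl; omega
              rw [ih t ht]
  intro l
  exact main l.length l le_rfl

-- one guarded replace pass of A, on the character lists
theorem pvStep (s k r : String) (hk : k.toList ≠ []) :
    (if PySem.Str.isIn k s then PySem.Str.replace s k r else s).toList
      = pvRep k.toList r.toList s.toList := by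
  by_cases h : PySem.Str.isIn k s
  · rw [if_pos h, PySem.Str.toList_replace, pvReplace_eq _ _ _ hk]
  · rw [if_neg h]
    refine (pvRep_no_occ _ _ _ ?_).symm
    intro hinf
    exact h ((PySem.Str.isIn_iff_infix k s).mpr hinf)

theorem pvA_toList (s : String) :
    (interpret_command s).toList = pvRep pvK3 pvR3 (pvRep pvK2 pvR2 (pvRep pvK1 pvR1 s.toList)) := by
  simp only [interpret_command]
  rw [pvStep _ "play songs" "play music" (by decide)]
  rw [pvStep _ "open browse" "open browser" (by decide)]
  rw [pvStep _ "hex soft" "hex software" (by decide)]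
  rfl

-- ===== VERDICT (by name: the statement is the Claim_ definition above) =====
theorem interpret_command_spec : Claim_equal_interpret_command := by
  intro command _
  show interpret_command command = interpret_command_alt command
  have h : (interpret_command command).toList = pvScan command.toList :=
    (pvA_toList command).trans (pvMain command.toList)
  rw [interpret_command_alt, ← h, String.ofList_toList]
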